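-- pv_equiv track=rewrite | github.com/pypi-data/pypi-mirror-277 | packages/eegAudioAnotator/eegaudioanotator-1.0.0.tar.gz/eegaudioanotator-1.0.0/eegAudioAnotator/classes/utils.py | correctEegTriggers
-- ===== SOURCE A (Python) =====
-- def correctEegTriggers(triggers):
--     """
--     Corrects a list of EEG triggers by mapping them to the nearest valid code
--     from a predefined set of correct codes.
--
--     This function takes a list of integer EEG trigger codes and corrects them by mapping
--     each trigger to the nearest valid code from a predefined set of valid codes. If a trigger
--     code is not in the predefined set, it is mapped to the closest valid code.
--
--     Parameters:
--     triggers (list of int): A list of integer trigger codes to be corrected.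
--
--     Returns:
--     list of int: A list of corrected trigger codes. Each input trigger is either directly
--                  mapped if it exists in the valid codes, or mapped to the nearest valid code
--                  if it does not.
--
--     Example:
--     >>> triggers = [5, 20, 100, 130]
--     >>> CorrectEegTriggers(triggers)
--     [8, 16, 96, 128]
--     """
--
--     correctCodings = {
--         255: 255, 224: 224, 192: 192, 160: 160,
--         128: 128, 96: 96, 64: 64, 32: 32, 16: 16, 8: 8
--     }
--
--     validCodes = sorted(correctCodings.keys())
--
--     maxTrigger = max(validCodes)
--     nearestCodeMap = {}
--
--     for i in range(maxTrigger + 1):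
--         nearestCode = min(validCodes, key=lambda x: abs(x - i))
--         nearestCodeMap[i] = correctCodings[nearestCode]
--
--     correctedTriggers = []
--     for trigger in triggers:
--         if trigger in nearestCodeMap:
--             correctedTriggers.append(nearestCodeMap[trigger])
--         else:
--             correctedTriggers.append(nearestCodeMap[maxTrigger])
--
--     return correctedTriggers
-- ===== SOURCE B (Python) =====
-- def correctEegTriggers(triggers):
--     # Simpler: no precomputed 256-entry nearest-code table; compute the nearest
--     # valid code directly per trigger (ascending scan => ties go to the smaller
--     # code, exactly like A's min over the sorted list).
--     validCodes = [8, 16, 32, 64, 96, 128, 160, 192, 224, 255]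
--     return [min(validCodes, key=lambda c: abs(c - t)) if 0 <= t <= 255 else 255
--             for t in triggers]
-- ===== Notes on version B (the rewrite author's own statement) =====
-- stated objective: simpler
-- what changed: Drops A's precomputed 256-entry nearest-code dictionary (and the identity dict of valid codes) and instead computes min(validCodes, key=abs(c-t)) directly per trigger, with a range guard replacing the dict-membership test.
import Mathlib
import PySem

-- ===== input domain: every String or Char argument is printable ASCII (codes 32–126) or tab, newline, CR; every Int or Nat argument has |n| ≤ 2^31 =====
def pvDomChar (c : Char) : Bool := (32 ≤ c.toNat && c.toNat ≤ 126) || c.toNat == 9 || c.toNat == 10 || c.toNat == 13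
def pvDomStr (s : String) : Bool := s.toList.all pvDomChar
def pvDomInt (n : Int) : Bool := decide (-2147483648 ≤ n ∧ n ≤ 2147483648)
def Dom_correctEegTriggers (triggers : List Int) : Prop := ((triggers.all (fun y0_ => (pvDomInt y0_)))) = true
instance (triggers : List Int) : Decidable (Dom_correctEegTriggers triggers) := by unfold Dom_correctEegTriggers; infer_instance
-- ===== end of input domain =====

-- B drops A's precomputed 256-entry nearest-code table and computes the nearest valid code per trigger (simpler).

-- ===== PORT A =====
def pvCorrectCodings : PySem.Dict Int Int :=
  PySem.Dict.ofList [(255,255),(224,224),(192,192),(160,160),(128,128),(96,96),(64,64),(32,32),(16,16),(8,8)]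

def pvValidCodes : List Int := PySem.List.sorted pvCorrectCodings.keys (fun x => x) false

-- max(validCodes): validCodes is a nonempty literal-derived list, so Python's max never raises; .getD 0 is never taken
def pvMaxTrigger : Int := (PySem.List.max? pvValidCodes (fun x => x)).getD 0

-- nearestCodeMap built by the range loop; correctCodings[nearestCode] always hits (nearestCode ∈ keys), so .getD 0 is never taken
def pvNearestCodeMap : PySem.Dict Int Int :=
  (PySem.List.pyRange 0 (pvMaxTrigger + 1) 1).foldl
    (fun d i =>
      d.insert i ((pvCorrectCodings.get? ((PySem.List.min? pvValidCodes (fun x => |x - i|)).getD 0)).getD 0))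
    PySem.Dict.empty

def correctEegTriggers (triggers : List Int) : List Int :=
  triggers.foldl
    (fun acc trigger =>
      if pvNearestCodeMap.contains trigger then
        acc ++ [(pvNearestCodeMap.get? trigger).getD 0]   -- nearestCodeMap[trigger], key present
      else
        acc ++ [(pvNearestCodeMap.get? pvMaxTrigger).getD 0]) []

-- ===== PORT B =====
def pvValidCodesB : List Int := [8, 16, 32, 64, 96, 128, 160, 192, 224, 255]

def correctEegTriggers_alt (triggers : List Int) : List Int :=
  triggers.map (fun t =>
    if 0 ≤ t ∧ t ≤ 255 then (PySem.List.min? pvValidCodesB (fun c => |c - t|)).getD 255  -- min over nonempty list, default never taken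
    else 255)

-- ===== PRECONDITION & SPEC =====
def Spec_correctEegTriggers (triggers : List Int) (out : List Int) : Prop := out = correctEegTriggers_alt triggers
instance (triggers : List Int) (out : List Int) : Decidable (Spec_correctEegTriggers triggers out) := by unfold Spec_correctEegTriggers; infer_instance

-- ===== CLAIM (what is proved, stated in full; the proofs are below) =====
def Claim_equal_correctEegTriggers : Prop := ∀ (triggers : List Int), Dom_correctEegTriggers triggers → Spec_correctEegTriggers triggers (correctEegTriggers triggers)

-- ===== LEMMAS AND PROOFS =====

theorem pvVC_eq : pvValidCodes = pvValidCodesB := by decide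

theorem pvMaxT_eq : pvMaxTrigger = 255 := by decide

theorem pvNCM_items :
    pvNearestCodeMap.items =
      (PySem.List.pyRange 0 256 1).map
        (fun i => (i, (pvCorrectCodings.get? ((PySem.List.min? pvValidCodes (fun x => |x - i|)).getD 0)).getD 0)) := by
  unfold pvNearestCodeMap
  rw [pvMaxT_eq, show (255 : Int) + 1 = 256 from rfl,
    PySem.Dict.items_foldl_insert_fresh (PySem.List.pyRange 0 256 1) (fun i => i)
      (fun i => (pvCorrectCodings.get? ((PySem.List.min? pvValidCodes (fun x => |x - i|)).getD 0)).getD 0)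
      PySem.Dict.empty (fun a _ => by simp)
      (by simpa using PySem.List.nodup_pyRange_one 0 256)]
  simp [PySem.Dict.empty]

theorem pvNCM_keys : pvNearestCodeMap.keys = PySem.List.pyRange 0 256 1 := by
  simp only [PySem.Dict.keys, pvNCM_items, List.map_map]
  simp [Function.comp_def]

theorem pvNCM_get_in (t : Int) (h0 : 0 ≤ t) (h1 : t ≤ 255) :
    pvNearestCodeMap.get? t =
      some ((pvCorrectCodings.get? ((PySem.List.min? pvValidCodes (fun x => |x - t|)).getD 0)).getD 0) := by
  apply PySem.Dict.get?_of_mem_items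
  · rw [pvNCM_items]
    exact List.mem_map.mpr ⟨t, (PySem.List.mem_pyRange_one).mpr ⟨h0, by omega⟩, rfl⟩
  · rw [pvNCM_keys]; exact PySem.List.nodup_pyRange_one 0 256

theorem pvNCM_get_out (t : Int) (h : ¬ (0 ≤ t ∧ t ≤ 255)) : pvNearestCodeMap.get? t = none := by
  rw [PySem.Dict.get?_eq_none_iff_not_mem_keys, pvNCM_keys, PySem.List.mem_pyRange_one]
  omega

theorem pvCC_get (m : Int) (hm : m ∈ pvValidCodesB) : pvCorrectCodings.get? m = some m := by
  fin_cases hm <;> rfl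

theorem pv_pointwise (t : Int) :
    (if pvNearestCodeMap.contains t then (pvNearestCodeMap.get? t).getD 0
     else (pvNearestCodeMap.get? pvMaxTrigger).getD 0)
    = (if 0 ≤ t ∧ t ≤ 255 then (PySem.List.min? pvValidCodesB (fun c => |c - t|)).getD 255 else 255) := by
  by_cases h : 0 ≤ t ∧ t ≤ 255
  · rw [if_pos h, PySem.Dict.contains_eq_isSome_get?, pvNCM_get_in t h.1 h.2]
    simp only [Option.isSome_some, if_true, Option.getD_some]
    rw [pvVC_eq]
    obtain ⟨m, hm⟩ : ∃ m, PySem.List.min? pvValidCodesB (fun x => |x - t|) = some m := by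
      cases hmin : PySem.List.min? pvValidCodesB (fun x => |x - t|) with
      | none => exact absurd ((PySem.List.min?_eq_none_iff _ _).mp hmin) (by decide)
      | some m => exact ⟨m, rfl⟩
    rw [hm]
    simp only [Option.getD_some]
    rw [pvCC_get m (PySem.List.min?_mem hm)]
    rfl
  · rw [if_neg h, PySem.Dict.contains_eq_isSome_get?, pvNCM_get_out t h]
    simp only [Option.isSome_none, Bool.false_eq_true, if_false]
    rw [pvMaxT_eq, pvNCM_get_in 255 (by norm_num) (by norm_num)]
    decide

-- ===== VERDICT (by name: the statement is the Claim_ definition above) =====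
theorem correctEegTriggers_spec : Claim_equal_correctEegTriggers := by
  intro triggers _
  unfold Spec_correctEegTriggers correctEegTriggers correctEegTriggers_alt
  rw [show (fun acc trigger =>
        if pvNearestCodeMap.contains trigger then
          acc ++ [(pvNearestCodeMap.get? trigger).getD 0]
        else acc ++ [(pvNearestCodeMap.get? pvMaxTrigger).getD 0])
      = fun (acc : List Int) trigger => acc ++
          [if pvNearestCodeMap.contains trigger then (pvNearestCodeMap.get? trigger).getD 0
           else (pvNearestCodeMap.get? pvMaxTrigger).getD 0] from by
        funext acc trigger; split <;> rfl]
  rw [PySem.List.foldl_append_singleton_eq_map, List.nil_append]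
  exact List.map_congr_left (fun t _ => pv_pointwise t)
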